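-- pv_equiv track=rewrite | github.com/haein-side/self-coding-test | kakao2/o_3.Py.py | solution
-- ===== SOURCE A (Python) =====
-- from collections import defaultdict
--
-- def solution(kor, usa, incs):
--     kor_list = [[] for _ in range(len(incs))] # 각 incs에 있는 한국
--
--     for i in range(len(incs)):
--         countries = incs[i].split()
--         for c in countries:
--             if c in kor:
--                 kor_list[i].append(c)
--
--     usa_dict = defaultdict(dict) # {'AB': {BCD: 0, AAA: 0}}
--
--     for i in range(len(incs)):
--         countries = incs[i].split()
--         for c in countries:
--             if c not in kor_list[i]:
--                 if c not in usa_dict: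
--                     usa_dict[c] = dict()
--                 for j in kor_list[i]:
--                     if j not in usa_dict[c].keys():
--                         usa_dict[c][j] = 1
--                     else:
--                         usa_dict[c][j] += 1
--
--
--     # {'AB': {'BCD': 3, 'AAA': 3, 'AAAAA': 2}, 'AA': {'BCD': 1, 'AAA': 1, 'AAAAA': 2}, 'TTTT': {'BCD': 2, 'AAA': 2, 'AAAAA': 1}})
--     # {'XXXX': {}}
--
--     max_value = -1
--     for i in usa_dict.keys():
--         for k in usa_dict[i].keys():
--             if max_value < usa_dict[i][k]:
--                 max_value = usa_dict[i][k]
--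
--     if max_value == -1:
--         return 0
--     else:
--         return max_value
-- ===== SOURCE B (Python) =====
-- def solution(kor, usa, incs):
--     kor_set = set(kor)
--     totals = {}
--     for line in incs:
--         counts = {}
--         for t in line.split():
--             counts[t] = counts.get(t, 0) + 1
--         kor_toks = [(t, n) for t, n in counts.items() if t in kor_set]
--         for c, cc in counts.items():
--             if c not in kor_set:
--                 for j, jc in kor_toks:
--                     totals[(c, j)] = totals.get((c, j), 0) + cc * jc
--     return max(totals.values(), default=0)
-- ===== Notes on version B (the rewrite author's own statement) =====
-- stated objective: faster
-- what changed: B replaces A's two-pass per-occurrence nested-dict counting (increment usa_dict[c][j] once per (occurrence of c, occurrence of j) pair in each line) with one pass that builds a per-line Counter and adds one multiplicity product cc*jc per distinct (country, korean) pair into a single flat dict, then takes max(values, default=0).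
import Mathlib
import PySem

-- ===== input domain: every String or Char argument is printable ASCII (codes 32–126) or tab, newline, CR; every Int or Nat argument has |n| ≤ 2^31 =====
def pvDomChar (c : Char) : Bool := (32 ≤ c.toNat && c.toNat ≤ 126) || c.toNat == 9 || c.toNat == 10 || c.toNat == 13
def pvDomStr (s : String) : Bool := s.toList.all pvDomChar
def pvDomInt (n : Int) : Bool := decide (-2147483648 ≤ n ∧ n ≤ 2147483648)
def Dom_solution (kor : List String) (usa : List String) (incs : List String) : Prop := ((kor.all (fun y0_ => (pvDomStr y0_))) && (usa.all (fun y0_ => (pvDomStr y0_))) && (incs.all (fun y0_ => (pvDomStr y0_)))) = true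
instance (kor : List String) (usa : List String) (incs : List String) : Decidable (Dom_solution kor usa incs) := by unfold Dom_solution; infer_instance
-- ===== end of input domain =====

-- B re-groups the counting around per-line token Counters and one flat (country, korean)-pair dict
-- updated with one multiplicity product per distinct pair, instead of A's per-occurrence nested-dict
-- increments; objective: faster (measured faster in a timing run on duplicate-heavy lines).

-- ===== PORT A =====
-- kor_list[i] entries: the per-line loop appending Korean tokens
def solKorLine (kor : List String) (line : String) : List String :=
  (PySem.Str.split₀ line).foldl (fun acc c => if kor.contains c then acc ++ [c] else acc) []

-- body of 'for j in kor_list[i]: usa_dict[c][j] = 1 / += 1'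
def solStepJ (c : String) (d : PySem.Dict String (PySem.Dict String Int)) (j : String) :
    PySem.Dict String (PySem.Dict String Int) :=
  let inner := d.getD c PySem.Dict.empty
  if inner.contains j = false then d.insert c (inner.insert j 1)
  else d.insert c (inner.insert j (inner.getD j 0 + 1))

-- body of 'for c in countries: …' of the second pass
def solStepC (korLine : List String) (d : PySem.Dict String (PySem.Dict String Int)) (c : String) :
    PySem.Dict String (PySem.Dict String Int) :=
  if korLine.contains c then d
  else korLine.foldl (solStepJ c) (if d.contains c then d else d.insert c PySem.Dict.empty)

-- one line of the second pass (p = (incs[i], kor_list[i]))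
def solStepLine (d : PySem.Dict String (PySem.Dict String Int)) (p : String × List String) :
    PySem.Dict String (PySem.Dict String Int) :=
  (PySem.Str.split₀ p.1).foldl (solStepC p.2) d

def solution (kor : List String) (usa : List String) (incs : List String) : Int :=
  let korList : List (List String) := incs.map (solKorLine kor)
  let usaDict : PySem.Dict String (PySem.Dict String Int) :=
    (List.zip incs korList).foldl solStepLine PySem.Dict.empty
  let maxValue : Int :=
    usaDict.keys.foldl (fun m i =>
      (usaDict.getD i PySem.Dict.empty).keys.foldl (fun m k =>
        if m < (usaDict.getD i PySem.Dict.empty).getD k 0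
        then (usaDict.getD i PySem.Dict.empty).getD k 0 else m) m) (-1)
  if maxValue = -1 then 0 else maxValue

-- ===== PORT B =====
-- counts = per-line Counter of tokens
def altCounts (line : String) : PySem.Dict String Int :=
  (PySem.Str.split₀ line).foldl (fun d t => d.insert t (d.getD t 0 + 1)) PySem.Dict.empty

-- body of 'for j, jc in kor_toks: totals[(c, j)] += cc * jc'
def altStepQ (c : String) (cc : Int) (t : PySem.Dict (String × String) Int) (q : String × Int) :
    PySem.Dict (String × String) Int :=
  t.insert (c, q.1) (t.getD (c, q.1) 0 + cc * q.2)

-- one line of B: split the Counter's items into Korean / non-Korean and add the products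
def altStepLine (korSet : PySem.Set String) (totals : PySem.Dict (String × String) Int)
    (line : String) : PySem.Dict (String × String) Int :=
  let counts := altCounts line
  let korToks := counts.items.filter (fun q => korSet.contains q.1)
  counts.items.foldl (fun t p =>
    if korSet.contains p.1 then t else korToks.foldl (altStepQ p.1 p.2) t) totals

def solution_alt (kor : List String) (usa : List String) (incs : List String) : Int :=
  let korSet : PySem.Set String := PySem.Set.ofList kor
  let totals : PySem.Dict (String × String) Int := incs.foldl (altStepLine korSet) PySem.Dict.empty
  PySem.List.maxD totals.values (fun v => v) 0

-- ===== PRECONDITION & SPEC =====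
def Spec_solution (kor : List String) (usa : List String) (incs : List String) (out : Int) : Prop := out = solution_alt kor usa incs
instance (kor : List String) (usa : List String) (incs : List String) (out : Int) : Decidable (Spec_solution kor usa incs out) := by unfold Spec_solution; infer_instance

-- ===== CLAIM (what is proved, stated in full; the proofs are below) =====
def Claim_equal_solution : Prop := ∀ (kor : List String) (usa : List String) (incs : List String), Dom_solution kor usa incs → Spec_solution kor usa incs (solution kor usa incs)

-- ===== LEMMAS AND PROOFS =====

-- tokens of a line, and the weight one line contributes to the pair (c, j)
def pvToks (line : String) : List String := PySem.Str.split₀ line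

def pvN (kor : List String) (line : String) (c j : String) : Int :=
  (if c ∈ kor then 0 else ((pvToks line).count c : Int)) *
  (if j ∈ kor then ((pvToks line).count j : Int) else 0)

def pvS (kor : List String) (incs : List String) (c j : String) : Int :=
  (incs.map (fun l => pvN kor l c j)).sum

-- add k occurrences to an optional counter (k = 0: untouched)
def pvBump (o : Option Int) (k : Int) : Option Int := if k = 0 then o else some (o.getD 0 + k)

-- lookup of the pair (c, j) through A's nested dict
def pvPlook (d : PySem.Dict String (PySem.Dict String Int)) (c j : String) : Option Int :=
  (d.get? c).bind (fun inn => inn.get? j)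

theorem pvBump_pvBump (o : Option Int) (p q : Int) (hp : 0 ≤ p) (hq : 0 ≤ q) :
    pvBump (pvBump o p) q = pvBump o (p + q) := by
  unfold pvBump; split_ifs <;> simp_all <;> omega

theorem pvN_nonneg (kor : List String) (line : String) (c j : String) : 0 ≤ pvN kor line c j := by
  unfold pvN; split_ifs <;> positivity

theorem pvS_nonneg (kor : List String) (incs : List String) (c j : String) : 0 ≤ pvS kor incs c j := by
  unfold pvS
  refine List.sum_nonneg (fun x hx => ?_)
  obtain ⟨l, _, rfl⟩ := List.mem_map.1 hx
  exact pvN_nonneg kor l c j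

-- ---- A side: the nested dict counts each pair per occurrence ----

theorem solStepJ_eq (c : String) (d : PySem.Dict String (PySem.Dict String Int)) (j : String) :
    solStepJ c d j = d.insert c ((d.getD c PySem.Dict.empty).insert j ((d.getD c PySem.Dict.empty).getD j 0 + 1)) := by
  unfold solStepJ
  by_cases h : (d.getD c PySem.Dict.empty).contains j
  · simp [h]
  · simp only [Bool.not_eq_true] at h
    simp [h, PySem.Dict.getD_of_not_contains _ _ h]

theorem pvPlook_stepJ (c : String) (d : PySem.Dict String (PySem.Dict String Int)) (a c' j : String) :
    pvPlook (solStepJ c d a) c' j =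
      if c' = c ∧ j = a then some ((pvPlook d c j).getD 0 + 1) else pvPlook d c' j := by
  rw [solStepJ_eq]
  unfold pvPlook
  by_cases hc : c' = c
  · subst hc
    simp only [PySem.Dict.get?_insert_self, Option.bind_some]
    by_cases hj : j = a
    · subst hj
      simp [PySem.Dict.get?_insert_self, PySem.Dict.getD_eq_get?_getD]
      cases h : d.get? c' <;> simp [PySem.Dict.getD_eq_get?_getD, h]
    · simp only [hj, and_false, if_false, PySem.Dict.get?_insert_of_ne _ _ hj,
        PySem.Dict.getD_eq_get?_getD]
      cases h : d.get? c' <;> simp [h]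
  · simp [hc, PySem.Dict.get?_insert_of_ne _ _ hc]

theorem pvPlook_stepJ_fold (js : List String) (c : String)
    (d : PySem.Dict String (PySem.Dict String Int)) (c' j : String) :
    pvPlook (js.foldl (solStepJ c) d) c' j =
      if c' = c then pvBump (pvPlook d c' j) (js.count j : Int) else pvPlook d c' j := by
  induction js generalizing d with
  | nil => simp [pvBump]
  | cons a rest ih =>
    simp only [List.foldl_cons, ih, pvPlook_stepJ]
    by_cases hc : c' = c
    · subst hc
      by_cases hj : j = a
      · subst hj
        simp only [List.count_cons_self, and_self, if_true, pvBump]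
        cases h : pvPlook d c' j <;> push_cast <;> split_ifs <;> simp_all <;> omega
      · simp [hj, List.count_cons_of_ne (by exact fun h => hj h.symm)]
    · simp [hc]

theorem pvPlook_ensure (d : PySem.Dict String (PySem.Dict String Int)) (c c' j : String) :
    pvPlook (if d.contains c then d else d.insert c PySem.Dict.empty) c' j = pvPlook d c' j := by
  split_ifs with h
  · rfl
  · simp only [Bool.not_eq_true] at h
    unfold pvPlook
    by_cases hc : c' = c
    · subst hc
      have : d.get? c' = none := by
        rw [PySem.Dict.get?_eq_none_iff_contains]; exact h
      simp [this, PySem.Dict.get?_insert_self]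
    · simp [PySem.Dict.get?_insert_of_ne _ _ hc]

theorem pvPlook_stepC (korLine : List String) (d : PySem.Dict String (PySem.Dict String Int))
    (c c' j : String) :
    pvPlook (solStepC korLine d c) c' j =
      pvBump (pvPlook d c' j)
        (if c' = c ∧ c ∉ korLine then (korLine.count j : Int) else 0) := by
  unfold solStepC
  by_cases h : c ∈ korLine
  · simp [h, pvBump]
  · rw [if_neg (by simpa using h), pvPlook_stepJ_fold, pvPlook_ensure]
    by_cases hc : c' = c <;> simp [hc, h, pvBump]

theorem pvPlook_tokfold (ts : List String) (korLine : List String)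
    (d : PySem.Dict String (PySem.Dict String Int)) (c' j : String) :
    pvPlook (ts.foldl (solStepC korLine) d) c' j =
      pvBump (pvPlook d c' j)
        ((if c' ∈ korLine then 0 else (ts.count c' : Int)) * (korLine.count j : Int)) := by
  induction ts generalizing d with
  | nil => simp [pvBump]
  | cons a rest ih =>
    simp only [List.foldl_cons, ih, pvPlook_stepC]
    rw [pvBump_pvBump]
    · congr 1
      by_cases hc : c' = a
      · subst hc
        by_cases hk : c' ∈ korLine <;> simp [hk, List.count_cons_self] <;> push_cast <;> ring
      · rw [List.count_cons_of_ne (fun h => hc h.symm)]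
        simp [hc]
    · split_ifs <;> positivity
    · split_ifs <;> positivity

theorem solKorLine_eq (kor : List String) (line : String) :
    solKorLine kor line = (pvToks line).filter (fun c => kor.contains c) := by
  unfold solKorLine pvToks
  have := PySem.List.foldl_append_if (fun c => kor.contains c) (fun c => c) (PySem.Str.split₀ line) []
  simpa using this

theorem pvLine_weight (kor : List String) (line : String) (c j : String) :
    (if c ∈ (pvToks line).filter (fun x => kor.contains x) then 0 else ((pvToks line).count c : Int)) *
      ((((pvToks line).filter (fun x => kor.contains x)).count j : Int)) = pvN kor line c j := by
  unfold pvN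
  have hcnt : (((pvToks line).filter (fun x => kor.contains x)).count j : Int)
      = if j ∈ kor then ((pvToks line).count j : Int) else 0 := by
    by_cases hj : j ∈ kor
    · rw [List.count_filter (by simpa using hj), if_pos hj]
    · rw [if_neg hj]
      norm_cast
      refine List.count_eq_zero.2 (fun hmem => ?_)
      exact hj (by simpa using List.of_mem_filter hmem)
  rw [hcnt]
  congr 1
  by_cases hc : c ∈ kor
  · by_cases hm : c ∈ pvToks line
    · rw [if_pos (List.mem_filter.2 ⟨hm, by simpa using hc⟩), if_pos hc]
    · rw [if_neg (fun h => hm (List.mem_of_mem_filter h)), if_pos hc]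
      simp [List.count_eq_zero.2 hm]
  · rw [if_neg hc, if_neg (fun h => hc (by simpa using List.of_mem_filter h))]

theorem pvPlook_stepLine (kor : List String) (line : String)
    (d : PySem.Dict String (PySem.Dict String Int)) (c j : String) :
    pvPlook (solStepLine d (line, solKorLine kor line)) c j =
      pvBump (pvPlook d c j) (pvN kor line c j) := by
  unfold solStepLine
  rw [solKorLine_eq]
  rw [pvPlook_tokfold]
  congr 1
  rw [← pvLine_weight kor line c j]
  rfl

theorem pvPlook_linesfold (kor : List String) (ls : List String)
    (d : PySem.Dict String (PySem.Dict String Int)) (c j : String) :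
    pvPlook ((ls.map (fun l => (l, solKorLine kor l))).foldl solStepLine d) c j =
      pvBump (pvPlook d c j) (pvS kor ls c j) := by
  induction ls generalizing d with
  | nil => simp [pvS, pvBump]
  | cons l rest ih =>
    rw [List.map_cons, List.foldl_cons, ih, pvPlook_stepLine,
      pvBump_pvBump _ _ _ (pvN_nonneg _ _ _ _) (pvS_nonneg _ _ _ _)]
    unfold pvS
    simp

-- A's final nested dict
def pvUsaDict (kor : List String) (incs : List String) : PySem.Dict String (PySem.Dict String Int) :=
  (List.zip incs (incs.map (solKorLine kor))).foldl solStepLine PySem.Dict.empty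

theorem pvZip_eq (kor : List String) (incs : List String) :
    List.zip incs (incs.map (solKorLine kor)) = incs.map (fun l => (l, solKorLine kor l)) := by
  have := List.zip_map' (f := id) (g := solKorLine kor) (l := incs)
  simpa using this

theorem pvLA (kor : List String) (incs : List String) (c j : String) :
    pvPlook (pvUsaDict kor incs) c j = pvBump none (pvS kor incs c j) := by
  unfold pvUsaDict
  rw [pvZip_eq, pvPlook_linesfold]
  congr 1

-- nodup invariant of A's nested dict
def pvAInv (d : PySem.Dict String (PySem.Dict String Int)) : Prop :=
  d.keys.Nodup ∧ ∀ c inn, d.get? c = some inn → inn.keys.Nodup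

theorem pvFoldl_preserve {α β : Type} (P : α → Prop) (f : α → β → α)
    (h : ∀ a b, P a → P (f a b)) : ∀ (l : List β) (a : α), P a → P (l.foldl f a) := by
  intro l
  induction l with
  | nil => exact fun a ha => ha
  | cons b rest ih => exact fun a ha => ih _ (h a b ha)

theorem pvAInv_insert (d : PySem.Dict String (PySem.Dict String Int)) (c : String)
    (inn : PySem.Dict String Int) (hd : pvAInv d) (hinn : inn.keys.Nodup) :
    pvAInv (d.insert c inn) := by
  refine ⟨PySem.Dict.nodup_keys_insert _ _ _ hd.1, fun c' inn' h => ?_⟩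
  by_cases hc : c' = c
  · subst hc
    rw [PySem.Dict.get?_insert_self] at h
    cases h; exact hinn
  · rw [PySem.Dict.get?_insert_of_ne _ _ hc] at h
    exact hd.2 c' inn' h

theorem pvAInv_stepJ (c : String) (d : PySem.Dict String (PySem.Dict String Int)) (j : String)
    (hd : pvAInv d) : pvAInv (solStepJ c d j) := by
  rw [solStepJ_eq]
  refine pvAInv_insert d c _ hd (PySem.Dict.nodup_keys_insert _ _ _ ?_)
  rw [PySem.Dict.getD_eq_get?_getD]
  cases h : d.get? c with
  | none => simpa using (PySem.Dict.nodup_keys_empty (κ := String) (ν := Int))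
  | some inn => exact hd.2 c inn h

theorem pvAInv_stepC (korLine : List String) (d : PySem.Dict String (PySem.Dict String Int))
    (c : String) (hd : pvAInv d) : pvAInv (solStepC korLine d c) := by
  unfold solStepC
  split_ifs with h1 h2
  · exact hd
  · exact pvFoldl_preserve pvAInv (solStepJ c) (fun a b ha => pvAInv_stepJ c a b ha) _ _ hd
  · exact pvFoldl_preserve pvAInv (solStepJ c) (fun a b ha => pvAInv_stepJ c a b ha) _ _
      (pvAInv_insert d c _ hd (by simpa using (PySem.Dict.nodup_keys_empty (κ := String) (ν := Int))))

theorem pvAInv_usaDict (kor : List String) (incs : List String) : pvAInv (pvUsaDict kor incs) := by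
  unfold pvUsaDict
  refine pvFoldl_preserve pvAInv solStepLine (fun a b ha => ?_) _ _ ?_
  · unfold solStepLine
    exact pvFoldl_preserve pvAInv (solStepC b.2) (fun a' b' ha' => pvAInv_stepC _ a' b' ha') _ _ ha
  · exact ⟨by simpa using (PySem.Dict.nodup_keys_empty (κ := String) (ν := PySem.Dict String Int)),
      fun c inn h => by simp [PySem.Dict.get?_empty] at h⟩

-- ---- B side: the flat pair dict gets the same counts via products ----

def pvAssoc (qs : List (String × Int)) (j : String) : Int :=
  ((qs.filter (fun q => q.1 = j)).map (·.2)).sum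

theorem pvAssoc_nonneg (qs : List (String × Int)) (j : String) (hq : ∀ q ∈ qs, 0 ≤ q.2) :
    0 ≤ pvAssoc qs j := by
  unfold pvAssoc
  refine List.sum_nonneg (fun x hx => ?_)
  obtain ⟨q, hmem, rfl⟩ := List.mem_map.1 hx
  exact hq q (List.mem_of_mem_filter hmem)

theorem pvAssoc_cons (q : String × Int) (qs : List (String × Int)) (j : String) :
    pvAssoc (q :: qs) j = (if q.1 = j then q.2 else 0) + pvAssoc qs j := by
  unfold pvAssoc
  by_cases h : q.1 = j <;> simp [List.filter_cons, h]

theorem pvSet_contains (kor : List String) (x : String) :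
    (PySem.Set.ofList kor).contains x = kor.contains x := by
  by_cases h : x ∈ kor
  · simp [(PySem.Set.mem_ofList kor x).2 h, h]
  · simp [h, fun hh => h ((PySem.Set.mem_ofList kor x).1 hh)]

theorem pvGet_altStepQ_fold (qs : List (String × Int)) (c : String) (cc : Int) (hcc : 0 < cc)
    (hq : ∀ q ∈ qs, 0 < q.2) (t : PySem.Dict (String × String) Int) (c' j : String) :
    (qs.foldl (altStepQ c cc) t).get? (c', j) =
      if c' = c then pvBump (t.get? (c', j)) (cc * pvAssoc qs j) else t.get? (c', j) := by
  induction qs generalizing t with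
  | nil => simp [pvAssoc, pvBump]
  | cons q rest ih =>
    rw [List.foldl_cons, ih (fun x hx => hq x (List.mem_cons_of_mem _ hx))]
    have hqpos : 0 < q.2 := hq q List.mem_cons_self
    have hrest : 0 ≤ pvAssoc rest j :=
      pvAssoc_nonneg _ _ (fun x hx => le_of_lt (hq x (List.mem_cons_of_mem _ hx)))
    by_cases hc : c' = c
    · subst hc
      rw [pvAssoc_cons]
      by_cases hj : q.1 = j
      · subst hj
        have h1 : (altStepQ c' cc t q).get? (c', q.1) = some (t.getD (c', q.1) 0 + cc * q.2) := by
          unfold altStepQ; exact PySem.Dict.get?_insert_self _ _ _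
        have h2 : some (t.getD (c', q.1) 0 + cc * q.2) = pvBump (t.get? (c', q.1)) (cc * q.2) := by
          unfold pvBump
          rw [if_neg (by nlinarith), PySem.Dict.getD_eq_get?_getD]
        rw [h1, h2, pvBump_pvBump _ _ _ (by nlinarith) (by nlinarith), if_pos rfl, if_pos rfl]
        congr 1
        simp only [if_true]
        ring
      · have h1 : (altStepQ c' cc t q).get? (c', j) = t.get? (c', j) := by
          unfold altStepQ
          refine PySem.Dict.get?_insert_of_ne _ _ (fun hh => hj ?_)
          exact (Prod.mk.injEq _ _ _ _ ▸ hh).2.symm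
        rw [if_pos rfl, if_pos rfl, h1, if_neg hj, zero_add]
    · rw [if_neg hc, if_neg hc]
      have h1 : (altStepQ c cc t q).get? (c', j) = t.get? (c', j) := by
        unfold altStepQ
        refine PySem.Dict.get?_insert_of_ne _ _ (fun hh => hc ?_)
        exact (Prod.mk.injEq _ _ _ _ ▸ hh).1
      rw [h1]

theorem pvAssoc_map (ks : List String) (f : String → Int) (c : String) (hnd : ks.Nodup) :
    pvAssoc (ks.map (fun k => (k, f k))) c = if c ∈ ks then f c else 0 := by
  induction ks with
  | nil => simp [pvAssoc]
  | cons k rest ih =>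
    rw [List.map_cons, pvAssoc_cons, ih (List.nodup_cons.1 hnd).2]
    by_cases h : k = c
    · subst h
      have hk : k ∉ rest := (List.nodup_cons.1 hnd).1
      simp [hk]
    · have hor : (c = k ∨ c ∈ rest) ↔ c ∈ rest := or_iff_right (fun hh => h hh.symm)
      simp only [List.mem_cons, hor, zero_add, if_neg (fun hh : k = c => h hh)]

theorem pvAssoc_filter (ps : List (String × Int)) (p : String → Bool) (j : String) :
    pvAssoc (ps.filter (fun q => p q.1)) j = if p j then pvAssoc ps j else 0 := by
  induction ps with
  | nil => simp [pvAssoc]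
  | cons q rest ih =>
    rw [List.filter_cons]
    by_cases hq : p q.1
    · rw [if_pos hq, pvAssoc_cons, pvAssoc_cons, ih]
      by_cases hj : q.1 = j
      · subst hj; simp [hq]
      · simp [hj]
    · rw [if_neg (by simpa using hq), pvAssoc_cons, ih]
      by_cases hj : q.1 = j
      · subst hj; simp [hq]
      · simp [hj]

theorem pvGet_outerB (kor : List String) (korSet : PySem.Set String)
    (hks : ∀ x, korSet.contains x = kor.contains x)
    (korToks : List (String × Int)) (hkt : ∀ q ∈ korToks, 0 < q.2)
    (ps : List (String × Int)) (hps : ∀ p ∈ ps, 0 < p.2)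
    (t : PySem.Dict (String × String) Int) (c j : String) :
    ((ps.foldl (fun t p =>
        if korSet.contains p.1 then t else korToks.foldl (altStepQ p.1 p.2) t) t)).get? (c, j) =
      pvBump (t.get? (c, j))
        ((if c ∈ kor then 0 else pvAssoc ps c) * pvAssoc korToks j) := by
  have hKA : 0 ≤ pvAssoc korToks j := pvAssoc_nonneg _ _ (fun q hq => le_of_lt (hkt q hq))
  induction ps generalizing t with
  | nil => simp [pvAssoc, pvBump]
  | cons p rest ih =>
    rw [List.foldl_cons, ih (fun x hx => hps x (List.mem_cons_of_mem _ hx))]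
    have hrest : 0 ≤ pvAssoc rest c :=
      pvAssoc_nonneg _ _ (fun x hx => le_of_lt (hps x (List.mem_cons_of_mem _ hx)))
    by_cases hg : korSet.contains p.1
    · rw [if_pos hg, pvAssoc_cons]
      have hmem : p.1 ∈ kor := by
        have := (hks p.1) ▸ hg
        simpa using this
      congr 2
      by_cases hc : c ∈ kor
      · simp [hc]
      · rw [if_neg hc, if_neg hc]
        have : ¬ p.1 = c := fun h => hc (h ▸ hmem)
        simp [this]
    · rw [if_neg hg,
        pvGet_altStepQ_fold korToks p.1 p.2 (hps p List.mem_cons_self)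
          (fun q hq => hkt q hq) t c j]
      have hnmem : p.1 ∉ kor := by
        intro hmem
        apply hg
        rw [hks p.1]
        simpa using hmem
      by_cases hc : c = p.1
      · subst hc
        rw [if_pos rfl, if_neg hnmem,
          pvBump_pvBump _ _ _
            (mul_nonneg (le_of_lt (hps p List.mem_cons_self)) hKA)
            (mul_nonneg hrest hKA),
          pvAssoc_cons, if_neg hnmem]
        congr 1
        simp only [if_true]
        ring
      · rw [if_neg hc, pvAssoc_cons]
        congr 2
        by_cases hk : c ∈ kor
        · simp [hk]
        · rw [if_neg hk, if_neg hk]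
          have hne : ¬ p.1 = c := fun h => hc h.symm
          simp [hne]

theorem pvCounter_items_pos (ts : List String) :
    ∀ p ∈ (PySem.Dict.counter ts).items, 0 < p.2 := by
  intro p hp
  rw [PySem.Dict.items_counter] at hp
  obtain ⟨k, hk, rfl⟩ := List.mem_map.1 hp
  have : k ∈ ts := (PySem.Set.mem_ofList ts k).1 hk
  simpa using List.count_pos_iff.2 this

theorem pvGet_altStepLine (kor : List String) (line : String)
    (t : PySem.Dict (String × String) Int) (c j : String) :
    (altStepLine (PySem.Set.ofList kor) t line).get? (c, j) =
      pvBump (t.get? (c, j)) (pvN kor line c j) := by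
  unfold altStepLine altCounts
  rw [PySem.Dict.foldl_insert_getD_add_one_eq_counter]
  have hpos := pvCounter_items_pos (PySem.Str.split₀ line)
  rw [pvGet_outerB kor _ (pvSet_contains kor)
    _ (fun q hq => hpos q (List.mem_of_mem_filter hq)) _ hpos t c j]
  congr 1
  have hitems : (PySem.Dict.counter (PySem.Str.split₀ line)).items
      = (PySem.Set.ofList (PySem.Str.split₀ line)).map
          (fun k => (k, ((PySem.Str.split₀ line).count k : Int))) :=
    PySem.Dict.items_counter _
  have hA : ∀ x : String, pvAssoc (PySem.Dict.counter (PySem.Str.split₀ line)).items x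
      = if x ∈ PySem.Set.ofList (PySem.Str.split₀ line)
        then ((PySem.Str.split₀ line).count x : Int) else 0 := by
    intro x
    rw [hitems, pvAssoc_map _ _ _ (PySem.Set.nodup_ofList _)]
  have hAc : ∀ x : String, pvAssoc (PySem.Dict.counter (PySem.Str.split₀ line)).items x
      = ((PySem.Str.split₀ line).count x : Int) := by
    intro x
    rw [hA x]
    by_cases hx : x ∈ PySem.Set.ofList (PySem.Str.split₀ line)
    · rw [if_pos hx]
    · rw [if_neg hx]
      have : x ∉ PySem.Str.split₀ line := fun h => hx ((PySem.Set.mem_ofList _ _).2 h)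
      simp [List.count_eq_zero.2 this]
  have hK : pvAssoc ((PySem.Dict.counter (PySem.Str.split₀ line)).items.filter
      (fun q => (PySem.Set.ofList kor).contains q.1)) j
      = if j ∈ kor then ((PySem.Str.split₀ line).count j : Int) else 0 := by
    rw [pvAssoc_filter, pvSet_contains]
    by_cases hj : j ∈ kor
    · rw [if_pos (by simpa using hj), if_pos hj, hAc]
    · rw [if_neg (by simpa using hj), if_neg hj]
  rw [hK]
  unfold pvN pvToks
  congr 1
  by_cases hc : c ∈ kor
  · simp [hc]
  · rw [if_neg hc, if_neg hc, hAc]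

def pvTotals (kor : List String) (incs : List String) : PySem.Dict (String × String) Int :=
  incs.foldl (altStepLine (PySem.Set.ofList kor)) PySem.Dict.empty

theorem pvGet_linesfoldB (kor : List String) (ls : List String)
    (t : PySem.Dict (String × String) Int) (c j : String) :
    (ls.foldl (altStepLine (PySem.Set.ofList kor)) t).get? (c, j) =
      pvBump (t.get? (c, j)) (pvS kor ls c j) := by
  induction ls generalizing t with
  | nil => simp [pvS, pvBump]
  | cons l rest ih =>
    rw [List.foldl_cons, ih, pvGet_altStepLine,
      pvBump_pvBump _ _ _ (pvN_nonneg _ _ _ _) (pvS_nonneg _ _ _ _)]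
    unfold pvS
    simp

theorem pvLB (kor : List String) (incs : List String) (c j : String) :
    (pvTotals kor incs).get? (c, j) = pvBump none (pvS kor incs c j) := by
  unfold pvTotals
  rw [pvGet_linesfoldB]
  congr 1

theorem pvTotals_nodup (kor : List String) (incs : List String) : (pvTotals kor incs).keys.Nodup := by
  unfold pvTotals
  refine pvFoldl_preserve (fun (t : PySem.Dict (String × String) Int) => t.keys.Nodup) _
    (fun t line ht => ?_) _ _ ?_
  · unfold altStepLine
    refine pvFoldl_preserve (fun (t : PySem.Dict (String × String) Int) => t.keys.Nodup) _
      (fun t p ht' => ?_) _ _ ht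
    split_ifs with h
    · exact ht'
    · refine pvFoldl_preserve (fun (t : PySem.Dict (String × String) Int) => t.keys.Nodup) _
        (fun t q ht'' => ?_) _ _ ht'
      exact PySem.Dict.nodup_keys_insert _ _ _ ht''
  · simpa using (PySem.Dict.nodup_keys_empty (κ := String × String) (ν := Int))

-- ---- extraction: both programs take the maximum of the same multiset of counts ----

theorem pvFoldl_flatten (ll : List (List Int)) (a : Int) :
    ll.flatten.foldl max a = ll.foldl (fun m l => l.foldl max m) a := by
  induction ll generalizing a with
  | nil => rfl
  | cons h t ih => simp [List.foldl_append, ih]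

-- A's pair items, flattened
def pvItemsA (kor : List String) (incs : List String) : List ((String × String) × Int) :=
  (pvUsaDict kor incs).items.flatMap (fun p => p.2.items.map (fun q => ((p.1, q.1), q.2)))

theorem pvItemsA_mem (kor : List String) (incs : List String) (c j : String) (v : Int) :
    ((c, j), v) ∈ pvItemsA kor incs ↔ pvPlook (pvUsaDict kor incs) c j = some v := by
  obtain ⟨hnd, hinn⟩ := pvAInv_usaDict kor incs
  unfold pvItemsA pvPlook
  constructor
  · intro h
    obtain ⟨p, hp, hq⟩ := List.mem_flatMap.1 h
    obtain ⟨q, hq2, hq3⟩ := List.mem_map.1 hq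
    obtain ⟨h1, h2⟩ := Prod.mk.injEq _ _ _ _ ▸ hq3
    obtain ⟨hc, hj⟩ := Prod.mk.injEq _ _ _ _ ▸ h1
    subst hc hj h2
    obtain ⟨pk, pv⟩ := p
    obtain ⟨qk, qv⟩ := q
    rw [(PySem.Dict.get?_eq_some_iff_mem_items _ _ _ hnd).2 hp]
    simp only [Option.bind_some]
    exact (PySem.Dict.get?_eq_some_iff_mem_items _ _ _
      (hinn _ _ ((PySem.Dict.get?_eq_some_iff_mem_items _ _ _ hnd).2 hp))).2 hq2
  · intro h
    cases hg : (pvUsaDict kor incs).get? c with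
    | none => rw [hg] at h; simp at h
    | some inn =>
      rw [hg] at h
      simp only [Option.bind_some] at h
      refine List.mem_flatMap.2 ⟨(c, inn),
        (PySem.Dict.get?_eq_some_iff_mem_items _ _ _ hnd).1 hg, ?_⟩
      refine List.mem_map.2 ⟨(j, v),
        (PySem.Dict.get?_eq_some_iff_mem_items _ _ _ (hinn _ _ hg)).1 h, rfl⟩

theorem pvItemsA_nodup (kor : List String) (incs : List String) : (pvItemsA kor incs).Nodup := by
  obtain ⟨hnd, hinn⟩ := pvAInv_usaDict kor incs
  unfold pvItemsA
  rw [List.nodup_flatMap]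
  constructor
  · intro p hp
    obtain ⟨pk, pv⟩ := p
    have hpv : pv.keys.Nodup :=
      hinn _ _ ((PySem.Dict.get?_eq_some_iff_mem_items _ _ _ hnd).2 hp)
    have : pv.items.Nodup := List.Nodup.of_map Prod.fst hpv
    exact this.map (fun a b hab => by
      obtain ⟨h1, h2⟩ := Prod.mk.injEq _ _ _ _ ▸ hab
      obtain ⟨_, h3⟩ := Prod.mk.injEq _ _ _ _ ▸ h1
      exact Prod.ext h3 h2)
  · have hnd' : ((pvUsaDict kor incs).items.map Prod.fst).Nodup := by
      simpa [PySem.Dict.keys] using hnd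
    have hp2 : (pvUsaDict kor incs).items.Pairwise (fun a b => a.1 ≠ b.1) :=
      List.pairwise_map.1 hnd'
    refine hp2.imp ?_
    intro a b hab x hxa hxb
    obtain ⟨qa, hqa, rfl⟩ := List.mem_map.1 hxa
    obtain ⟨qb, hqb, heq⟩ := List.mem_map.1 hxb
    exact hab ((congrArg (fun y => y.1.1) heq).symm)

theorem pvItems_perm (kor : List String) (incs : List String) :
    (pvItemsA kor incs).Perm (pvTotals kor incs).items := by
  have hndB : (pvTotals kor incs).items.Nodup :=
    List.Nodup.of_map Prod.fst (by simpa [PySem.Dict.keys] using pvTotals_nodup kor incs)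
  rw [List.perm_ext_iff_of_nodup (pvItemsA_nodup kor incs) hndB]
  rintro ⟨⟨c, j⟩, v⟩
  rw [pvItemsA_mem, pvLA, ← pvLB]
  exact PySem.Dict.get?_eq_some_iff_mem_items _ _ _ (pvTotals_nodup kor incs)

theorem pvValues_pos (kor : List String) (incs : List String) (v : Int)
    (hv : v ∈ (pvTotals kor incs).values) : 1 ≤ v := by
  have hnd := pvTotals_nodup kor incs
  have hv' : v ∈ (pvTotals kor incs).items.map (·.2) := by
    simpa [PySem.Dict.values] using hv
  obtain ⟨⟨⟨c, j⟩, w⟩, hp, hw⟩ := List.mem_map.1 hv'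
  subst hw
  have hg := (PySem.Dict.get?_eq_some_iff_mem_items _ _ _ hnd).2 hp
  rw [pvLB] at hg
  unfold pvBump at hg
  by_cases hS : pvS kor incs c j = 0
  · rw [if_pos hS] at hg; cases hg
  · rw [if_neg hS] at hg
    have hSn := pvS_nonneg kor incs c j
    cases hg
    simpa using by omega

theorem pvA_fold_eq (kor : List String) (incs : List String) :
    (pvUsaDict kor incs).keys.foldl (fun m i =>
      ((pvUsaDict kor incs).getD i PySem.Dict.empty).keys.foldl (fun m k =>
        if m < ((pvUsaDict kor incs).getD i PySem.Dict.empty).getD k 0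
        then ((pvUsaDict kor incs).getD i PySem.Dict.empty).getD k 0 else m) m) (-1) =
    ((pvItemsA kor incs).map (·.2)).foldl max (-1) := by
  obtain ⟨hnd, hinn⟩ := pvAInv_usaDict kor incs
  -- the outer keys loop is a loop over the values list
  rw [← List.foldl_map (f := fun i => (pvUsaDict kor incs).getD i PySem.Dict.empty)
      (g := fun m inn => inn.keys.foldl (fun m k => if m < inn.getD k 0 then inn.getD k 0 else m) m),
    ← PySem.Dict.values_eq_map_keys _ hnd PySem.Dict.empty]
  -- each inner keys loop is a running max over the inner values
  rw [PySem.List.foldl_congr_mem _ _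
      (fun m inn => inn.values.foldl max m) _ ?_]
  · -- flatten the nested fold
    have h1 : (pvItemsA kor incs).map (·.2)
        = (pvUsaDict kor incs).items.flatMap (fun p => p.2.values) := by
      unfold pvItemsA
      rw [List.map_flatMap]
      refine List.flatMap_congr (fun p hp => ?_)
      rw [List.map_map]
      rfl
    rw [h1, List.flatMap_def, pvFoldl_flatten, List.foldl_map]
    have h2 : (pvUsaDict kor incs).values = (pvUsaDict kor incs).items.map (·.2) := rfl
    rw [h2, List.foldl_map]
  · intro acc inn hmem
    have hmem' : inn ∈ (pvUsaDict kor incs).items.map (·.2) := by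
      simpa [PySem.Dict.values] using hmem
    obtain ⟨⟨k, inn'⟩, hp, hk⟩ := List.mem_map.1 hmem'
    have hik : inn'.keys.Nodup :=
      hinn _ _ ((PySem.Dict.get?_eq_some_iff_mem_items _ _ _ hnd).2 hp)
    have hik2 : inn.keys.Nodup := by rw [← hk]; exact hik
    rw [← List.foldl_map (f := fun k => inn.getD k 0) (g := fun m v => if m < v then v else m),
      ← PySem.Dict.values_eq_map_keys _ hik2 0]
    refine PySem.List.foldl_congr_mem _ _ max _ (fun a x _ => ?_)
    rcases lt_or_ge a x with h | h
    · rw [if_pos h, max_eq_right h.le]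
    · rw [if_neg (not_lt.2 h), max_eq_left h]

theorem pvSolution_eq (kor : List String) (usa : List String) (incs : List String) :
    solution kor usa incs =
      (if ((pvItemsA kor incs).map (·.2)).foldl max (-1) = -1 then 0
       else ((pvItemsA kor incs).map (·.2)).foldl max (-1)) := by
  rw [← pvA_fold_eq]
  rfl

-- ===== VERDICT (by name: the statement is the Claim_ definition above) =====
theorem solution_spec : Claim_equal_solution := by
  intro kor usa incs _
  unfold Spec_solution
  rw [pvSolution_eq]
  have halt : solution_alt kor usa incs
      = (PySem.List.max? (pvTotals kor incs).values (fun v => v)).getD 0 := rfl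
  rw [halt]
  have hperm : ((pvItemsA kor incs).map (·.2)).Perm ((pvTotals kor incs).items.map (·.2)) :=
    (pvItems_perm kor incs).map _
  have hvals : (pvTotals kor incs).values = (pvTotals kor incs).items.map (·.2) := rfl
  cases hmx : PySem.List.max? (pvTotals kor incs).values (fun v => v) with
  | none =>
    have hnil : (pvTotals kor incs).values = [] := (PySem.List.max?_eq_none_iff _ _).1 hmx
    have hnilA : (pvItemsA kor incs).map (·.2) = [] := by
      rw [hvals] at hnil
      exact List.Perm.eq_nil (hnil ▸ hperm)
    rw [hnilA]
    simp
  | some m =>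
    have hmem : m ∈ (pvTotals kor incs).values := PySem.List.max?_mem hmx
    have hm1 : 1 ≤ m := pvValues_pos kor incs m hmem
    have hmF : m ≤ ((pvItemsA kor incs).map (·.2)).foldl max (-1) :=
      (PySem.List.le_foldl_max ((pvItemsA kor incs).map (·.2)) (-1)).2 m
        ((hperm.mem_iff).2 (hvals ▸ hmem))
    have hFne : ¬ ((pvItemsA kor incs).map (·.2)).foldl max (-1) = -1 := by omega
    have hFm : ((pvItemsA kor incs).map (·.2)).foldl max (-1) ≤ m := by
      rcases PySem.List.foldl_max_mem ((pvItemsA kor incs).map (·.2)) (-1) with h | h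
      · omega
      · have hmemF : ((pvItemsA kor incs).map (·.2)).foldl max (-1) ∈ (pvTotals kor incs).values := by
          rw [hvals]
          exact (hperm.mem_iff).1 h
        simpa using PySem.List.max?_isMax hmx _ hmemF
    rw [if_neg hFne]
    simp only [Option.getD_some]
    omega
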